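-- pv_equiv track=rewrite | github.com/Ghahrep/gertie | agents/security_screener_agent.py | _determine_capability_from_query
-- ===== SOURCE A (Python) =====
-- def _determine_capability_from_query(query: str) -> str:
--     """Override MCP capability determination for screening-specific logic"""
--     query_lower = query.lower()
--
--     # Check for portfolio complement requests
--     if any(word in query_lower for word in ["complement", "diversify", "balance", "improve"]):
--         return "portfolio_complement_analysis"
--
--     # Check for specific factor analysis
--     factor_mentioned = any(factor in query_lower for factor in ["quality", "value", "growth", "factor"])
--     if factor_mentioned:
--         return "factor_analysis"
--
--     # Check for fundamental analysis
--     if any(word in query_lower for word in ["fundamental", "financial", "metrics"]):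
--         return "fundamental_screening"
--
--     # Check for stock selection
--     if any(word in query_lower for word in ["select", "pick", "choose"]):
--         return "stock_selection"
--
--     # Default to general security screening
--     return "security_screening"
-- ===== SOURCE B (Python) =====
-- PRIORITY = {
--     "complement": 0, "diversify": 0, "balance": 0, "improve": 0,
--     "quality": 1, "value": 1, "growth": 1, "factor": 1,
--     "fundamental": 2, "financial": 2, "metrics": 2,
--     "select": 3, "pick": 3, "choose": 3,
-- }
--
-- CAPS = [
--     "portfolio_complement_analysis",
--     "factor_analysis",
--     "fundamental_screening",
--     "stock_selection",
--     "security_screening",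
-- ]
--
-- def _determine_capability_from_query(query: str) -> str:
--     query_lower = query.lower()
--     best = 4
--     for word, priority in PRIORITY.items():
--         if word in query_lower:
--             best = min(best, priority)
--     return CAPS[best]
-- ===== Notes on version B (the rewrite author's own statement) =====
-- stated objective: alternative
-- what changed: Instead of A's ordered group checks with early returns, B flattens all keywords into one keyword-to-priority table, makes a single accumulator pass computing the MINIMUM priority among all matching keywords, and indexes a capability array with it (default slot 4).
import Mathlib
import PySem

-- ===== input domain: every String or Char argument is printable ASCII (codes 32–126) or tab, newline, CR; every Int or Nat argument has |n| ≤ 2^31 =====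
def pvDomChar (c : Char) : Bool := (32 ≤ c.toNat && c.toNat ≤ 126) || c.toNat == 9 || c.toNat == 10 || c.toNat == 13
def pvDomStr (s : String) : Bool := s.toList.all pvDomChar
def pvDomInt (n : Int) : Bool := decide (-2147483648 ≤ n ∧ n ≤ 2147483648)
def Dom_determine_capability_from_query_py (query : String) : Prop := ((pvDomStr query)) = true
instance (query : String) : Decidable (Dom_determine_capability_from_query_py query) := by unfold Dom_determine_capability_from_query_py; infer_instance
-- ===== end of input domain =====

-- B replaces A's ordered group checks/early returns by a flat keyword→priority table, one
-- accumulator pass taking the minimum matched priority, and an indexed capability array (alternative).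

-- ===== PORT A =====
def determine_capability_from_query_py (query : String) : String :=
  let query_lower := PySem.Str.lower query
  if ["complement", "diversify", "balance", "improve"].any (fun word => PySem.Str.isIn word query_lower) then
    "portfolio_complement_analysis"
  else
    let factor_mentioned := ["quality", "value", "growth", "factor"].any (fun factor => PySem.Str.isIn factor query_lower)
    if factor_mentioned then
      "factor_analysis"
    else if ["fundamental", "financial", "metrics"].any (fun word => PySem.Str.isIn word query_lower) then
      "fundamental_screening"
    else if ["select", "pick", "choose"].any (fun word => PySem.Str.isIn word query_lower) then
      "stock_selection"
    else
      "security_screening"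

-- ===== PORT B =====
def pvPriority : List (String × Int) :=
  [ ("complement", 0), ("diversify", 0), ("balance", 0), ("improve", 0),
    ("quality", 1), ("value", 1), ("growth", 1), ("factor", 1),
    ("fundamental", 2), ("financial", 2), ("metrics", 2),
    ("select", 3), ("pick", 3), ("choose", 3) ]

def pvCaps : List String :=
  [ "portfolio_complement_analysis", "factor_analysis", "fundamental_screening",
    "stock_selection", "security_screening" ]

def determine_capability_from_query_py_alt (query : String) : String :=
  let query_lower := PySem.Str.lower query
  let best := pvPriority.foldl
    (fun best wp => if PySem.Str.isIn wp.1 query_lower then min best wp.2 else best) 4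
  -- CAPS[best]: best is always in [0,4], so the Python indexing never raises; getD "" is unreachable
  (PySem.List.pyGet? pvCaps best).getD ""

-- ===== PRECONDITION & SPEC =====
def Spec_determine_capability_from_query_py (query : String) (out : String) : Prop := out = determine_capability_from_query_py_alt query
instance (query : String) (out : String) : Decidable (Spec_determine_capability_from_query_py query out) := by unfold Spec_determine_capability_from_query_py; infer_instance

-- ===== CLAIM (what is proved, stated in full; the proofs are below) =====
def Claim_equal_determine_capability_from_query_py : Prop := ∀ (query : String), Dom_determine_capability_from_query_py query → Spec_determine_capability_from_query_py query (determine_capability_from_query_py query)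

-- ===== LEMMAS AND PROOFS =====

-- Folding the min-accumulator over a group of keywords that all carry the same priority p
-- collapses to a single test: did any keyword of the group match?
theorem pvGroupFold (ql : String) (ws : List String) (p a : Int) :
    List.foldl (fun best wp => if PySem.Str.isIn wp.1 ql then min best wp.2 else best) a
      (ws.map (fun w => (w, p)))
      = if ws.any (fun w => PySem.Str.isIn w ql) then min a p else a := by
  induction ws generalizing a with
  | nil => simp
  | cons w ws ih =>
    simp only [List.map_cons, List.foldl_cons, List.any_cons]
    by_cases h : PySem.Str.isIn w ql
    · rw [if_pos h, ih]
      by_cases h2 : ws.any (fun w => PySem.Str.isIn w ql)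
      · simp only [h, h2, Bool.true_or, if_pos, min_assoc, min_self]
      · simp only [h, h2, Bool.true_or, if_pos, Bool.false_eq_true, if_false]
    · rw [if_neg h, ih]
      simp only [h, Bool.false_or]

theorem pvTableSplit : pvPriority =
    (["complement", "diversify", "balance", "improve"].map (fun w => (w, (0 : Int))))
      ++ (["quality", "value", "growth", "factor"].map (fun w => (w, (1 : Int))))
      ++ (["fundamental", "financial", "metrics"].map (fun w => (w, (2 : Int))))
      ++ (["select", "pick", "choose"].map (fun w => (w, (3 : Int)))) := rfl

-- ===== VERDICT (by name: the statement is the Claim_ definition above) =====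
theorem determine_capability_from_query_py_spec : Claim_equal_determine_capability_from_query_py := by
  intro query _
  unfold Spec_determine_capability_from_query_py determine_capability_from_query_py determine_capability_from_query_py_alt
  rw [pvTableSplit]
  simp only [List.foldl_append, pvGroupFold]
  split_ifs <;> decide
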